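-- pv_equiv track=rewrite | github.com/SushantDave/Samasa_Prakarana | Code/samasa_splitter.py | handle_overlap_cases
-- ===== SOURCE A (Python) =====
-- def handle_overlap_cases(str1, str2):
--     # Case 1: str1 suffix matches str2 prefix
--     max_n = min(len(str1), len(str2))
--     for n in range(max_n, 0, -1):
--         if str1[-n:] == str2[:n]:
--             return str1[:-n] + str2
--
--     # Case 2: str2 is a substring of str1
--     if str2 in str1:
--         i = str1.index(str2)
--         return str1[:i + len(str2)]
--
--     # Case 3: str1 is a substring of str2
--     if str1 in str2:
--         i = str2.index(str1)
--         return str2[i:]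
--
--     # Case 4: str1 prefix matches str2 suffix
--     for n in range(min(len(str1), len(str2)), 0, -1):
--         if str1[:n] == str2[-n:]:
--             return str1[:n]
--
--     # If none of the cases match
--     return str1+str2
-- ===== SOURCE B (Python) =====
-- def _kmp_fail(p):
--     # classic KMP failure table: f[i] = length of longest proper border of p[:i+1]
--     f = [0] * len(p)
--     k = 0
--     for i in range(1, len(p)):
--         while k and p[i] != p[k]:
--             k = f[k - 1]
--         if p[i] == p[k]:
--             k += 1
--         f[i] = k
--     return f
--
--
-- def _max_overlap(a, b):
--     # largest n >= 1 with a[-n:] == b[:n], else 0: run the KMP automaton of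
--     # pattern b over text a; the final state is the longest suffix of a that
--     # is a prefix of b (a full match ending at the last character means n = len(b))
--     m = len(b)
--     if m == 0 or not a:
--         return 0
--     f = _kmp_fail(b)
--     k = 0
--     full = False
--     for c in a:
--         while k and c != b[k]:
--             k = f[k - 1]
--         if c == b[k]:
--             k += 1
--         full = k == m
--         if full:
--             k = f[m - 1]
--     return m if full else k
--
--
-- def handle_overlap_cases(str1, str2):
--     n = _max_overlap(str1, str2)
--     if n:
--         return str1[:len(str1) - n] + str2
--     i = str1.find(str2)
--     if i != -1:
--         return str1[:i + len(str2)]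
--     i = str2.find(str1)
--     if i != -1:
--         return str2[i:]
--     n = _max_overlap(str2, str1)
--     if n:
--         return str1[:n]
--     return str1 + str2
-- ===== Notes on version B (the rewrite author's own statement) =====
-- stated objective: faster
-- what changed: A finds the maximum suffix/prefix overlap by trying every candidate length descending with a fresh slice comparison per length (and uses 'in'+index for the containment cases); B instead builds a KMP failure table for the second string and runs the KMP automaton over the first string once, reading the maximum overlap off the final automaton state, so the per-length slice comparisons disappear.
import Mathlib
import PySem

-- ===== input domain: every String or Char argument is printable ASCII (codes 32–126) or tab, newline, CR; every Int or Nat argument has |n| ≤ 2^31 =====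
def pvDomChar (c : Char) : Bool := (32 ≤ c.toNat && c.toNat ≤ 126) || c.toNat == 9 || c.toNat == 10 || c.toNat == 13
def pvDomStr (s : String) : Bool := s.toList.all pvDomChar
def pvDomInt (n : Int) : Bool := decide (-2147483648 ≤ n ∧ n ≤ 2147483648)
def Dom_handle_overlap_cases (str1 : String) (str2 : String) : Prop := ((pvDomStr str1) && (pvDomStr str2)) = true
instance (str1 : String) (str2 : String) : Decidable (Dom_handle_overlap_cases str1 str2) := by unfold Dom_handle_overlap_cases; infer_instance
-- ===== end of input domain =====

-- B joins the two strings by the same four cases as A, but computes the maximum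
-- suffix/prefix overlap with a KMP failure table (automaton state after scanning the
-- text) instead of testing every candidate length with slice comparisons; same return
-- value on every input (A is total).

-- ===== PORT A =====
-- Case-1 loop of A: for n in range(max_n, 0, -1): if str1[-n:] == str2[:n]: return str1[:-n] + str2
def hocA_loop1 (l1 l2 : List Char) : List Int → Option (List Char)
  | [] => none
  | n :: rest =>
    if PySem.List.slice l1 (some (-n)) none = PySem.List.slice l2 none (some n) then
      some (PySem.List.slice l1 none (some (-n)) ++ l2)
    else hocA_loop1 l1 l2 rest

-- Case-4 loop of A: for n in range(min, 0, -1): if str1[:n] == str2[-n:]: return str1[:n]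
def hocA_loop4 (l1 l2 : List Char) : List Int → Option (List Char)
  | [] => none
  | n :: rest =>
    if PySem.List.slice l1 none (some n) = PySem.List.slice l2 (some (-n)) none then
      some (PySem.List.slice l1 none (some n))
    else hocA_loop4 l1 l2 rest

-- A on lists; str1.index(str2) after 'str2 in str1' is the first occurrence, i.e. Chars.find
def hocA (l1 l2 : List Char) : List Char :=
  match hocA_loop1 l1 l2 (PySem.List.pyRange (min (PySem.Chars.len l1) (PySem.Chars.len l2)) 0 (-1)) with
  | some r => r
  | none =>
    if PySem.Chars.isIn l2 l1 then
      PySem.List.slice l1 none (some (PySem.Chars.find l1 l2 + PySem.Chars.len l2))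
    else if PySem.Chars.isIn l1 l2 then
      PySem.List.slice l2 (some (PySem.Chars.find l2 l1)) none
    else
      match hocA_loop4 l1 l2 (PySem.List.pyRange (min (PySem.Chars.len l1) (PySem.Chars.len l2)) 0 (-1)) with
      | some r => r
      | none => l1 ++ l2

def handle_overlap_cases (str1 : String) (str2 : String) : String :=
  String.ofList (hocA str1.toList str2.toList)

-- ===== PORT B =====
-- the 'while k and c != p[k]: k = f[k-1]' loop of B; the 'min … k' clamp only makes the
-- recursion total (for the real failure table f[k-1] ≤ k-1 < k, so it never clamps)
def kmpFall (p : List Char) (f : List Nat) (c : Char) : Nat → Nat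
  | 0 => 0
  | k + 1 =>
    if c = p.getD (k + 1) default then k + 1
    else kmpFall p f c (min (f.getD k 0) k)
termination_by k => k
decreasing_by exact Nat.lt_succ_of_le (Nat.min_le_right _ _)

-- one automaton step: fall back, then 'if c == p[k]: k += 1'
def kmpStep (p : List Char) (f : List Nat) (c : Char) (k : Nat) : Nat :=
  let r := kmpFall p f c k
  if c = p.getD r default then r + 1 else r

-- _kmp_fail(p): f[0] = 0, then for i in range(1, len(p)) append the next state
def kmpFail (p : List Char) : List Nat :=
  if p.length = 0 then []
  else
    ((List.range' 1 (p.length - 1)).foldl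
      (fun (fk : List Nat × Nat) i =>
        let k := kmpStep p fk.1 (p.getD i default) fk.2
        (fk.1 ++ [k], k)) ([0], 0)).1

-- loop body of _max_overlap's scan: state (k, full)
def scanBody (p : List Char) (f : List Nat) (st : Nat × Bool) (c : Char) : Nat × Bool :=
  let k := kmpStep p f c st.1
  if k = p.length then (f.getD (p.length - 1) 0, true) else (k, false)

-- _max_overlap(a, b): run the automaton of pattern b over text a
def maxOverlap (a b : List Char) : Int :=
  if b.length = 0 ∨ a = [] then 0
  else
    let f := kmpFail b
    let s := a.foldl (scanBody b f) (0, false)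
    if s.2 then (b.length : Int) else (s.1 : Int)

def hocB (l1 l2 : List Char) : List Char :=
  let n := maxOverlap l1 l2
  if 0 < n then PySem.List.slice l1 none (some (PySem.Chars.len l1 - n)) ++ l2
  else if PySem.Chars.find l1 l2 ≠ -1 then
    PySem.List.slice l1 none (some (PySem.Chars.find l1 l2 + PySem.Chars.len l2))
  else if PySem.Chars.find l2 l1 ≠ -1 then
    PySem.List.slice l2 (some (PySem.Chars.find l2 l1)) none
  else
    let m := maxOverlap l2 l1
    if 0 < m then PySem.List.slice l1 none (some m)
    else l1 ++ l2

def handle_overlap_cases_alt (str1 : String) (str2 : String) : String :=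
  String.ofList (hocB str1.toList str2.toList)

-- ===== PRECONDITION & SPEC =====
def Spec_handle_overlap_cases (str1 : String) (str2 : String) (out : String) : Prop := out = handle_overlap_cases_alt str1 str2
instance (str1 : String) (str2 : String) (out : String) : Decidable (Spec_handle_overlap_cases str1 str2 out) := by unfold Spec_handle_overlap_cases; infer_instance

-- ===== CLAIM (what is proved, stated in full; the proofs are below) =====
def Claim_equal_handle_overlap_cases : Prop := ∀ (str1 : String) (str2 : String), Dom_handle_overlap_cases str1 str2 → Spec_handle_overlap_cases str1 str2 (handle_overlap_cases str1 str2)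

-- ===== LEMMAS AND PROOFS =====

-- π(l): length of the longest proper border of p[:l] (greatest n ≤ l-1 with p[:n] a suffix of p[:l])
def piP (p : List Char) (l : Nat) : Nat :=
  Nat.findGreatest (fun n => p.take n <:+ p.take l) (l - 1)

-- N(t): length of the longest prefix of p that is a suffix of t (bounded by |p|)
def NB (p t : List Char) : Nat :=
  Nat.findGreatest (fun n => p.take n <:+ t) p.length

-- a shorter p-prefix suffix of t is a suffix of a longer one
lemma border_trans (p t : List Char) (n k : Nat) (h1 : p.take n <:+ t)
    (h2 : p.take k <:+ t) (hnk : n ≤ k) (hk : k ≤ p.length) :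
    p.take n <:+ t → p.take n <:+ p.take k := by
  intro _
  rw [← List.reverse_prefix] at h1 h2 ⊢
  exact List.prefix_of_prefix_length_le h1 h2 (by
    simp only [List.length_reverse, List.length_take]
    omega)

-- extending a border by one character
lemma take_succ_concat (p t : List Char) (c : Char) (n : Nat) (hn : n < p.length) :
    p.take (n + 1) <:+ (t ++ [c]) ↔ (p.take n <:+ t ∧ p.getD n default = c) := by
  have hgd : p.getD n default = p[n]'hn := by
    rw [List.getD_eq_getElem?_getD, List.getElem?_eq_getElem hn]; rfl
  have htk : p.take (n + 1) = p.take n ++ [p.getD n default] := by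
    rw [List.take_succ, List.getElem?_eq_getElem hn, hgd]; rfl
  rw [htk, ← List.reverse_prefix, ← List.reverse_prefix]
  simp only [List.reverse_append, List.reverse_cons, List.reverse_nil, List.nil_append,
    List.cons_append, List.cons_prefix_cons]
  constructor
  · rintro ⟨h1, h2⟩; exact ⟨by simpa [List.reverse_prefix] using h2, h1⟩
  · rintro ⟨h1, h2⟩; exact ⟨h2, by simpa [List.reverse_prefix] using h1⟩

-- findGreatest is unchanged when the extra room above b1 contains no witness
lemma findGreatest_ext (P : Nat → Prop) [DecidablePred P] :
    ∀ (b2 b1 : Nat), b1 ≤ b2 → (∀ n, b1 < n → n ≤ b2 → ¬ P n) →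
      Nat.findGreatest P b2 = Nat.findGreatest P b1
  | 0, b1, h, _ => by rw [Nat.le_zero.mp h]
  | b2 + 1, b1, h, hno => by
    rcases Nat.eq_or_lt_of_le h with h' | h'
    · rw [h']
    · have : ¬ P (b2 + 1) := hno _ (by omega) (le_refl _)
      rw [Nat.findGreatest_succ, if_neg this]
      exact findGreatest_ext P b2 b1 (by omega) (fun n hn1 hn2 => hno n hn1 (by omega))

-- the fall loop finds the largest j ≤ k in the border chain with p[j] = c
lemma kmpFall_spec (p : List Char) (f : List Nat) (c : Char) (t : List Char) :
    ∀ (k : Nat), k < p.length → p.take k <:+ t →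
      (∀ j, 1 ≤ j → j ≤ k → f.getD (j - 1) 0 = piP p j) →
      kmpFall p f c k ≤ k ∧ p.take (kmpFall p f c k) <:+ t ∧
      (kmpFall p f c k = 0 ∨ c = p.getD (kmpFall p f c k) default) ∧
      (∀ j, j ≤ k → p.take j <:+ t → c = p.getD j default → j ≤ kmpFall p f c k)
  | 0, _, _, _ => by
    have h0 : kmpFall p f c 0 = 0 := by simp [kmpFall]
    rw [h0]
    exact ⟨le_refl _, by simpa using List.nil_suffix, Or.inl rfl, fun j hj _ _ => hj⟩
  | k + 1, hk, hsuf, hf => by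
    by_cases hc : c = p.getD (k + 1) default
    · rw [show kmpFall p f c (k + 1) = k + 1 by rw [kmpFall]; exact if_pos hc]
      exact ⟨le_refl _, hsuf, Or.inr hc, fun j hj _ _ => hj⟩
    · have hfk : f.getD k 0 = piP p (k + 1) := by
        have := hf (k + 1) (by omega) (le_refl _); simpa using this
      have hple : piP p (k + 1) ≤ k := by
        have := Nat.findGreatest_le (P := fun n => p.take n <:+ p.take (k + 1)) ((k + 1) - 1)
        simpa [piP] using this
      have hmin : min (f.getD k 0) k = piP p (k + 1) := by rw [hfk]; omega
      have hrec : kmpFall p f c (k + 1) = kmpFall p f c (piP p (k + 1)) := by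
        rw [kmpFall, if_neg hc, hmin]
      set k2 := piP p (k + 1) with hk2
      have hsuf2 : p.take k2 <:+ t := by
        rcases Nat.eq_zero_or_pos k2 with h0 | h0
        · rw [h0]; simpa using List.nil_suffix
        · have hP : p.take k2 <:+ p.take (k + 1) := by
            have := (Nat.findGreatest_eq_iff (P := fun n => p.take n <:+ p.take (k + 1))
              (k := (k + 1) - 1) (m := k2)).mp hk2.symm
            exact this.2.1 (by omega)
          exact hP.trans hsuf
      obtain ⟨ih1, ih2, ih3, ih4⟩ := kmpFall_spec p f c t k2 (by omega) hsuf2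
        (fun j hj1 hj2 => hf j hj1 (by omega))
      refine ⟨?_, ?_, ?_, ?_⟩
      · rw [hrec]; omega
      · rw [hrec]; exact ih2
      · rw [hrec]; exact ih3
      · intro j hj hjs hjc
        rw [hrec]
        rcases Nat.eq_or_lt_of_le hj with hje | hjl
        · exact absurd (hje ▸ hjc) hc
        · have hjb : p.take j <:+ p.take (k + 1) :=
            border_trans p t j (k + 1) hjs hsuf (by omega) (by omega) hjs
          have : j ≤ k2 := Nat.le_findGreatest (by omega) hjb
          exact ih4 j this hjs hjc

-- one automaton step computes the longest border of t ++ [c] below the bound k+1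
lemma kmpStep_spec (p : List Char) (f : List Nat) (c : Char) (t : List Char) (k : Nat)
    (hk : k < p.length) (hsuf : p.take k <:+ t)
    (hf : ∀ j, 1 ≤ j → j ≤ k → f.getD (j - 1) 0 = piP p j) :
    kmpStep p f c k = Nat.findGreatest (fun n => p.take n <:+ (t ++ [c])) (k + 1) := by
  obtain ⟨h1, h2, h3, h4⟩ := kmpFall_spec p f c t k hk hsuf hf
  set r := kmpFall p f c k with hr
  unfold kmpStep
  rw [← hr]
  by_cases hc : c = p.getD r default
  · rw [if_pos hc]
    symm
    rw [Nat.findGreatest_eq_iff]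
    refine ⟨by omega, fun _ => ?_, ?_⟩
    · exact (take_succ_concat p t c r (by omega)).mpr ⟨h2, hc.symm⟩
    · intro n hn1 hn2 hP
      have hn0 : 1 ≤ n := by omega
      have hlt : n - 1 < p.length := by omega
      have := (take_succ_concat p t c (n - 1) hlt).mp (by
        rw [show n - 1 + 1 = n by omega]; exact hP)
      have : n - 1 ≤ r := h4 (n - 1) (by omega) this.1 this.2.symm
      omega
  · rw [if_neg hc]
    have hr0 : r = 0 := h3.resolve_right hc
    rw [hr0]
    symm
    rw [Nat.findGreatest_eq_iff]
    refine ⟨by omega, fun h => absurd rfl h, ?_⟩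
    intro n hn1 hn2 hP
    have hlt : n - 1 < p.length := by omega
    have hext := (take_succ_concat p t c (n - 1) hlt).mp (by
      rw [show n - 1 + 1 = n by omega]; exact hP)
    have : n - 1 ≤ r := h4 (n - 1) (by omega) hext.1 hext.2.symm
    rw [hr0] at this
    have hn1' : n = 1 := by omega
    subst hn1'
    exact hc (by simpa [hr0] using hext.2.symm)

-- piP as borders of p itself, basic facts
lemma piP_le (p : List Char) (l : Nat) : piP p l ≤ l - 1 :=
  Nat.findGreatest_le _

lemma piP_suffix (p : List Char) (l : Nat) : p.take (piP p l) <:+ p.take l := by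
  rcases Nat.eq_zero_or_pos (piP p l) with h0 | h0
  · rw [h0]; simpa using List.nil_suffix
  · exact (Nat.findGreatest_eq_iff (P := fun n => p.take n <:+ p.take l)
      (k := l - 1) (m := piP p l)).mp rfl |>.2.1 (by omega)

-- the failure-table build loop: after processing 1..cnt the table is [π(1), …, π(cnt+1)]
lemma kmpFail_loop (p : List Char) :
    ∀ (cnt : Nat), 1 + cnt ≤ p.length →
      (List.range' 1 cnt).foldl
        (fun (fk : List Nat × Nat) i =>
          let k := kmpStep p fk.1 (p.getD i default) fk.2
          (fk.1 ++ [k], k)) ([0], 0) =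
      ((List.range (cnt + 1)).map (fun j => piP p (j + 1)), piP p (cnt + 1))
  | 0, h => by
    simp [piP, Nat.findGreatest]
  | cnt + 1, h => by
    have hrng : List.range' 1 (cnt + 1) = List.range' 1 cnt ++ [1 + cnt] := by
      simpa using List.range'_concat (s := 1) (n := cnt) (step := 1)
    rw [hrng, List.foldl_append, kmpFail_loop p cnt (by omega)]
    simp only [List.foldl_cons, List.foldl_nil]
    have hi : 1 + cnt = cnt + 1 := by omega
    rw [hi]
    -- the step at index i = cnt+1 with state k = π(cnt+1) and table prefix
    set F := (List.range (cnt + 1)).map (fun j => piP p (j + 1)) with hF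
    have hFget : ∀ j, 1 ≤ j → j ≤ cnt + 1 → F.getD (j - 1) 0 = piP p j := by
      intro j hj1 hj2
      rw [hF, List.getD_eq_getElem?_getD, List.getElem?_map,
        List.getElem?_range (by omega)]
      simp only [Option.map_some, Option.getD_some]
      congr 1; omega
    have hble := piP_le p (cnt + 1)
    have hstep : kmpStep p F (p.getD (cnt + 1) default) (piP p (cnt + 1)) = piP p (cnt + 2) := by
      have hlt : piP p (cnt + 1) < p.length := by omega
      have hcl : cnt + 1 < p.length := by omega
      have htake : p.take (cnt + 2) = p.take (cnt + 1) ++ [p.getD (cnt + 1) default] := by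
        rw [show cnt + 2 = (cnt + 1) + 1 from rfl, List.take_succ, List.getElem?_eq_getElem hcl]
        simp [List.getD_eq_getElem?_getD, List.getElem?_eq_getElem hcl]
      have hext2 : Nat.findGreatest (fun n => p.take n <:+ p.take (cnt + 2)) (cnt + 2 - 1)
          = Nat.findGreatest (fun n => p.take n <:+ p.take (cnt + 2)) (piP p (cnt + 1) + 1) := by
        apply findGreatest_ext
        · omega
        · intro n hn1 hn2 hP
          have hlt' : n - 1 < p.length := by omega
          have hext := (take_succ_concat p (p.take (cnt + 1)) (p.getD (cnt + 1) default)
            (n - 1) hlt').mp (by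
              rw [show n - 1 + 1 = n by omega, ← htake]; exact hP)
          have : n - 1 ≤ piP p (cnt + 1) := Nat.le_findGreatest (by omega) hext.1
          omega
      rw [kmpStep_spec p F (p.getD (cnt + 1) default) (p.take (cnt + 1)) (piP p (cnt + 1))
        hlt (piP_suffix p (cnt + 1)) (fun j hj1 hj2 => hFget j hj1 (by omega))]
      rw [← htake]
      conv_rhs => rw [piP]
      rw [hext2]
    rw [hstep]
    rw [Prod.mk.injEq]
    refine ⟨?_, rfl⟩
    rw [hF]
    simp [List.range_succ]

-- the finished failure table: entry j is π(j+1)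
lemma kmpFail_getD (p : List Char) (j : Nat) (hj : j < p.length) :
    (kmpFail p).getD j 0 = piP p (j + 1) := by
  have hp0 : p.length ≠ 0 := by omega
  rw [kmpFail, if_neg hp0]
  rw [kmpFail_loop p (p.length - 1) (by omega)]
  simp only
  rw [List.getD_eq_getElem?_getD, List.getElem?_map, List.getElem?_range (by omega)]
  rfl

-- scan invariant: k is the automaton state, full records a match ending at the last char
def ScanInv (p t : List Char) (st : Nat × Bool) : Prop :=
  st.1 < p.length ∧ p.take st.1 <:+ t ∧
  (∀ n, n < p.length → p.take n <:+ t → n ≤ st.1) ∧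
  (st.2 = true ↔ p <:+ t) ∧ (st.2 = false → st.1 = NB p t)

lemma scanBody_inv (p : List Char) (hp : p ≠ []) (t : List Char) (st : Nat × Bool) (c : Char)
    (h : ScanInv p t st) : ScanInv p (t ++ [c]) (scanBody p (kmpFail p) st c) := by
  obtain ⟨h1, h2, h3, h4, h5⟩ := h
  have hm : 0 < p.length := List.length_pos_iff.mpr hp
  have hf : ∀ j, 1 ≤ j → j ≤ st.1 → (kmpFail p).getD (j - 1) 0 = piP p j := by
    intro j hj1 hj2
    rw [kmpFail_getD p (j - 1) (by omega)]
    congr 1; omega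
  have hks := kmpStep_spec p (kmpFail p) c t st.1 h1 h2 hf
  set k2 := kmpStep p (kmpFail p) c st.1 with hk2
  -- k2 equals NB p (t ++ [c])
  have hNB : NB p (t ++ [c]) = k2 := by
    rw [NB, hks]
    apply findGreatest_ext
    · omega
    · intro n hn1 hn2 hP
      have hlt : n - 1 < p.length := by omega
      have hext := (take_succ_concat p t c (n - 1) hlt).mp (by
        rw [show n - 1 + 1 = n by omega]; exact hP)
      have := h3 (n - 1) hlt hext.1
      omega
  have hk2le : k2 ≤ p.length := by rw [← hNB, NB]; exact Nat.findGreatest_le _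
  have hk2suf : p.take k2 <:+ (t ++ [c]) := by
    rcases Nat.eq_zero_or_pos k2 with h0 | h0
    · rw [h0]; simpa using List.nil_suffix
    · have := (Nat.findGreatest_eq_iff (P := fun n => p.take n <:+ (t ++ [c]))
        (k := p.length) (m := NB p (t ++ [c]))).mp rfl
      rw [hNB] at this
      exact this.2.1 (by omega)
  have hfullIff : p <:+ (t ++ [c]) ↔ k2 = p.length := by
    constructor
    · intro hsuffull
      have : p.length ≤ NB p (t ++ [c]) :=
        Nat.le_findGreatest (le_refl _) (by rw [List.take_length]; exact hsuffull)
      omega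
    · intro hk
      have := hk ▸ hk2suf
      rwa [List.take_length] at this
  unfold scanBody
  rw [← hk2]
  by_cases hfull : k2 = p.length
  · rw [if_pos hfull]
    have hpsuf : p <:+ (t ++ [c]) := hfullIff.mpr hfull
    have hgd : (kmpFail p).getD (p.length - 1) 0 = piP p p.length := by
      rw [kmpFail_getD p (p.length - 1) (by omega)]
      congr 1; omega
    refine ⟨?_, ?_, ?_, ?_, ?_⟩
    · simp only [hgd]
      have := piP_le p p.length; omega
    · simp only [hgd]
      have := (piP_suffix p p.length)
      rw [List.take_length] at this
      exact this.trans hpsuf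
    · intro n hn hnsuf
      simp only [hgd]
      have hb : p.take n <:+ p.take p.length := border_trans p (t ++ [c]) n p.length hnsuf
        (by rw [List.take_length]; exact hpsuf) (by omega) (le_refl _) hnsuf
      exact Nat.le_findGreatest (by omega) hb
    · simp [hpsuf]
    · intro hcon; simp at hcon
  · rw [if_neg hfull]
    refine ⟨by omega, hk2suf, ?_, ?_, fun _ => hNB.symm⟩
    · intro n hn hnsuf
      rw [← hNB, NB]
      exact Nat.le_findGreatest (by omega) hnsuf
    · simp only
      constructor
      · intro hcon; exact absurd hcon (by simp)
      · intro hsuffull; exact absurd (hfullIff.mp hsuffull) hfull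

lemma scan_fold (p : List Char) (hp : p ≠ []) :
    ∀ (rest t : List Char) (st : Nat × Bool), ScanInv p t st →
      ScanInv p (t ++ rest) (rest.foldl (scanBody p (kmpFail p)) st)
  | [], t, st, h => by simpa using h
  | c :: rest, t, st, h => by
    have h' := scanBody_inv p hp t st c h
    have := scan_fold p hp rest (t ++ [c]) _ h'
    simpa using this

-- the whole scan computes NB p a
lemma maxOverlap_NB (a b : List Char) (ha : a ≠ []) (hb : b ≠ []) :
    maxOverlap a b = (NB b a : Int) := by
  have hm : 0 < b.length := List.length_pos_iff.mpr hb
  have hinit : ScanInv b [] (0, false) := by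
    refine ⟨hm, by simpa using List.nil_suffix, ?_, ?_, ?_⟩
    · intro n hn hnsuf
      rw [List.suffix_nil] at hnsuf
      have : (b.take n).length = 0 := by rw [hnsuf]; rfl
      rw [List.length_take] at this
      omega
    · simp [List.suffix_nil, hb]
    · intro _
      symm
      rw [NB, Nat.findGreatest_eq_iff]
      refine ⟨by omega, fun h => absurd rfl h, ?_⟩
      intro n hn1 hn2 hP
      rw [List.suffix_nil] at hP
      have : (b.take n).length = 0 := by rw [hP]; rfl
      rw [List.length_take] at this
      omega
  have hfin := scan_fold b hb a [] (0, false) hinit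
  rw [List.nil_append] at hfin
  obtain ⟨g1, g2, g3, g4, g5⟩ := hfin
  have hcond : ¬ (b.length = 0 ∨ a = []) := by
    rintro (h | h)
    · omega
    · exact ha h
  rw [show maxOverlap a b = (if (a.foldl (scanBody b (kmpFail b)) (0, false)).2
        then (b.length : Int) else ((a.foldl (scanBody b (kmpFail b)) (0, false)).1 : Int)) by
      simp only [maxOverlap, if_neg hcond]]
  by_cases hfull : (a.foldl (scanBody b (kmpFail b)) (0, false)).2 = true
  · rw [if_pos hfull]
    have hpsuf : b <:+ a := g4.mp hfull
    have hNBm : NB b a = b.length := by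
      have hge : b.length ≤ NB b a :=
        Nat.le_findGreatest (le_refl _) (by rw [List.take_length]; exact hpsuf)
      have hle : NB b a ≤ b.length := Nat.findGreatest_le _
      omega
    rw [hNBm]
  · have hf : (a.foldl (scanBody b (kmpFail b)) (0, false)).2 = false := by
      revert hfull; cases (a.foldl (scanBody b (kmpFail b)) (0, false)).2 <;> simp
    rw [if_neg hfull, g5 hf]

-- n-length overlap as a border: a[-n:] is a prefix of b ↔ b[:n] is a suffix of a
lemma overlap_bridge (a b : List Char) (n : Nat) (hn1 : 0 < n) (hna : n ≤ a.length)
    (hnb : n ≤ b.length) : (a.drop (a.length - n) <+: b) ↔ (b.take n <:+ a) := by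
  constructor
  · intro h
    have hlen : (a.drop (a.length - n)).length = n := by
      rw [List.length_drop]; omega
    have := List.prefix_iff_eq_take.mp h
    rw [hlen] at this
    rw [← this]
    exact List.drop_suffix _ _
  · intro h
    have hlen : (b.take n).length = n := by rw [List.length_take]; omega
    have := List.suffix_iff_eq_drop.mp h
    rw [hlen] at this
    rw [← this]
    exact List.take_prefix _ _

-- descending find? over start positions ↔ the greatest overlap length NB
lemma NB_find? (a b : List Char) :
    ((List.range' (a.length - min a.length b.length) (min a.length b.length)).find?
      (fun i => decide (a.drop i <+: b))).elim 0 (fun i => (a.length : Int) - i) =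
    (NB b a : Int) := by
  set mn := min a.length b.length with hmn
  set g := NB b a with hg
  have hgle : g ≤ b.length := Nat.findGreatest_le _
  rcases Nat.eq_zero_or_pos g with hg0 | hgpos
  · have hnone : (List.range' (a.length - mn) mn).find?
        (fun i => decide (a.drop i <+: b)) = none := by
      rw [List.find?_eq_none]
      intro i hi
      have hmem := List.mem_range'_1.mp hi
      simp only [decide_eq_true_eq]
      intro hpre
      have hn1 : 0 < a.length - i := by omega
      have hb : b.take (a.length - i) <:+ a := by
        have := (overlap_bridge a b (a.length - i) hn1 (by omega) (by omega)).mp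
          (by rw [show a.length - (a.length - i) = i by omega]; exact hpre)
        exact this
      have : a.length - i ≤ g := Nat.le_findGreatest (by omega) hb
      omega
    rw [hnone, hg0]
    rfl
  · have hgsuf : b.take g <:+ a := by
      exact (Nat.findGreatest_eq_iff (P := fun n => b.take n <:+ a)
        (k := b.length) (m := g)).mp rfl |>.2.1 (by omega)
    have hgla : g ≤ a.length := by
      have := hgsuf.length_le
      rw [List.length_take] at this
      omega
    set i0 := a.length - g with hi0
    have h1 : i0 - (a.length - mn) + (mn - (i0 - (a.length - mn))) = mn := by omega
    have h2 : (a.length - mn) + 1 * (i0 - (a.length - mn)) = i0 := by omega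
    have hsplit := List.range'_append (s := a.length - mn)
      (m := i0 - (a.length - mn)) (n := mn - (i0 - (a.length - mn))) (step := 1)
    rw [h1, h2] at hsplit
    rw [← hsplit, List.find?_append]
    have hfirst : (List.range' (a.length - mn) (i0 - (a.length - mn))).find?
        (fun i => decide (a.drop i <+: b)) = none := by
      rw [List.find?_eq_none]
      intro i hi
      have hmem := List.mem_range'_1.mp hi
      simp only [decide_eq_true_eq]
      intro hpre
      have hn1 : 0 < a.length - i := by omega
      have hb : b.take (a.length - i) <:+ a :=
        (overlap_bridge a b (a.length - i) hn1 (by omega) (by omega)).mp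
          (by rw [show a.length - (a.length - i) = i by omega]; exact hpre)
      have : a.length - i ≤ g := Nat.le_findGreatest (by omega) hb
      omega
    rw [hfirst, Option.none_or]
    have hcnt : mn - (i0 - (a.length - mn)) = (mn - (i0 - (a.length - mn)) - 1) + 1 := by
      omega
    rw [hcnt, List.range'_succ]
    have hhead : a.drop i0 <+: b :=
      (overlap_bridge a b g hgpos hgla (by omega)).mpr hgsuf
    rw [List.find?_cons_of_pos (by simpa using hhead)]
    simp only [Option.elim]
    omega

-- the previous characterization of maxOverlap, in the form hoc_eq consumes
lemma maxOverlap_eq (a b : List Char) :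
    maxOverlap a b =
      ((List.range' (a.length - min a.length b.length) (min a.length b.length)).find?
          (fun i => decide (a.drop i <+: b))).elim 0 (fun i => (a.length : Int) - i) := by
  rcases List.eq_nil_or_concat' b with hb | ⟨b', c, hbc⟩
  · subst hb
    simp [maxOverlap]
  · rcases List.eq_nil_or_concat' a with ha | ⟨a', d, hac⟩
    · subst ha
      simp [maxOverlap]
    · have ha : a ≠ [] := by subst hac; simp
      have hb : b ≠ [] := by subst hbc; simp
      rw [maxOverlap_NB a b ha hb, NB_find? a b]

-- range(m, 0, -1) is the descending list of overlap lengths n = len - i, i ascending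
lemma pyRange_desc (m len : Nat) (h : m ≤ len) :
    PySem.List.pyRange (m : Int) 0 (-1) =
      (List.range' (len - m) m).map (fun (i : Nat) => ((len : Int) - (i : Int))) := by
  have h1 : PySem.List.pyRange (m : Int) 0 (-1) = (List.range m).map (fun (k : Nat) => (m : Int) - (k : Int)) := by
    rcases Nat.eq_zero_or_pos m with hm | hm
    · subst hm; simp [PySem.List.pyRange]
    · have hm' : (0 : Int) < m := by exact_mod_cast hm
      simp only [PySem.List.pyRange]
      rw [if_neg (by norm_num), if_neg (by norm_num), if_pos hm']
      norm_num
      intro k _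
      ring
  rw [h1, List.range'_eq_map_range, List.map_map]
  apply List.map_congr_left
  intro k hk
  simp only [Function.comp_apply, List.mem_range] at *
  omega

-- A's case-1 loop = first i in [lo, len) with (drop i l1) a prefix of l2
lemma loop1_eq (a b : List Char) :
    ∀ (cnt lo : Nat), lo + cnt = a.length →
      hocA_loop1 a b ((List.range' lo cnt).map (fun (i : Nat) => ((a.length : Int) - (i : Int)))) =
        ((List.range' lo cnt).find? (fun i => decide (a.drop i <+: b))).map
          (fun i => a.take i ++ b)
  | 0, lo, h => by simp [hocA_loop1]
  | cnt + 1, lo, h => by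
    have hlo : lo < a.length := by omega
    set k : Nat := a.length - lo with hkdef
    have hkpos : 0 < k := by omega
    have hak : a.length - k = lo := by omega
    have hcast : (a.length : Int) - (lo : Int) = (k : Int) := by omega
    rw [List.range'_succ, List.map_cons]
    simp only [hocA_loop1]
    rw [hcast, PySem.List.slice_from_neg_natCast a k hkpos, PySem.List.slice_to_natCast, hak]
    have hlen : (a.drop lo).length = k := by simp; omega
    have hiff : (a.drop lo <+: b) ↔ (List.drop lo a = List.take k b) := by
      rw [List.prefix_iff_eq_take, hlen]
    by_cases hc : a.drop lo <+: b
    · rw [if_pos (hiff.mp hc)]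
      rw [PySem.List.slice_to_neg_natCast a k hkpos, hak]
      rw [List.find?_cons_of_pos (by simpa using hc)]
      simp
    · rw [if_neg (fun hcc => hc (hiff.mpr hcc))]
      rw [List.find?_cons_of_neg (by simpa using hc)]
      exact loop1_eq a b cnt (lo + 1) (by omega)

-- A's case-4 loop = first i in [lo, len b) with (drop i l2) a prefix of l1
lemma loop4_eq (a b : List Char) :
    ∀ (cnt lo : Nat), lo + cnt = b.length →
      hocA_loop4 a b ((List.range' lo cnt).map (fun (i : Nat) => ((b.length : Int) - (i : Int)))) =
        ((List.range' lo cnt).find? (fun i => decide (b.drop i <+: a))).map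
          (fun i => a.take (b.length - i))
  | 0, lo, h => by simp [hocA_loop4]
  | cnt + 1, lo, h => by
    have hlo : lo < b.length := by omega
    set k : Nat := b.length - lo with hkdef
    have hkpos : 0 < k := by omega
    have hbk : b.length - k = lo := by omega
    have hcast : (b.length : Int) - (lo : Int) = (k : Int) := by omega
    rw [List.range'_succ, List.map_cons]
    simp only [hocA_loop4]
    rw [hcast, PySem.List.slice_to_natCast, PySem.List.slice_from_neg_natCast b k hkpos, hbk]
    have hlen : (b.drop lo).length = k := by simp; omega
    have hiff : (b.drop lo <+: a) ↔ (List.take k a = List.drop lo b) := by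
      rw [List.prefix_iff_eq_take, hlen, eq_comm]
    by_cases hc : b.drop lo <+: a
    · rw [if_pos (hiff.mp hc)]
      rw [List.find?_cons_of_pos (by simpa using hc)]
      simp [hkdef]
    · rw [if_neg (fun hcc => hc (hiff.mpr hcc))]
      rw [List.find?_cons_of_neg (by simpa using hc)]
      exact loop4_eq a b cnt (lo + 1) (by omega)

lemma hoc_eq (l1 l2 : List Char) : hocA l1 l2 = hocB l1 l2 := by
  have hminc : min (PySem.Chars.len l1) (PySem.Chars.len l2) = ((min l1.length l2.length : Nat) : Int) := by
    simp only [PySem.Chars.len_eq]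
    omega
  have hA1 : hocA_loop1 l1 l2
      (PySem.List.pyRange (min (PySem.Chars.len l1) (PySem.Chars.len l2)) 0 (-1)) =
      ((List.range' (l1.length - min l1.length l2.length) (min l1.length l2.length)).find?
        (fun i => decide (l1.drop i <+: l2))).map (fun i => l1.take i ++ l2) := by
    rw [hminc, pyRange_desc (min l1.length l2.length) l1.length (Nat.min_le_left _ _),
        loop1_eq l1 l2 (min l1.length l2.length) (l1.length - min l1.length l2.length) (by omega)]
  have hA4 : hocA_loop4 l1 l2
      (PySem.List.pyRange (min (PySem.Chars.len l1) (PySem.Chars.len l2)) 0 (-1)) =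
      ((List.range' (l2.length - min l1.length l2.length) (min l1.length l2.length)).find?
        (fun i => decide (l2.drop i <+: l1))).map (fun i => l1.take (l2.length - i)) := by
    rw [hminc, pyRange_desc (min l1.length l2.length) l2.length (Nat.min_le_right _ _),
        loop4_eq l1 l2 (min l1.length l2.length) (l2.length - min l1.length l2.length) (by omega)]
  have hB1 := maxOverlap_eq l1 l2
  have hB4 : maxOverlap l2 l1 =
      ((List.range' (l2.length - min l1.length l2.length) (min l1.length l2.length)).find?
        (fun i => decide (l2.drop i <+: l1))).elim 0 (fun i => (l2.length : Int) - i) := by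
    rw [maxOverlap_eq, Nat.min_comm l2.length l1.length]
  simp only [hocA, hocB]
  rw [hA1, hB1, hA4, hB4]
  cases hfo : (List.range' (l1.length - min l1.length l2.length) (min l1.length l2.length)).find?
      (fun i => decide (l1.drop i <+: l2)) with
  | some i =>
    have hi := List.mem_range'_1.mp (List.mem_of_find?_eq_some hfo)
    have hilt : i < l1.length := by omega
    simp only [Option.map_some, Option.elim]
    rw [if_pos (by omega : (0 : Int) < (l1.length : Int) - i)]
    rw [show PySem.Chars.len l1 - ((l1.length : Int) - (i : Int)) = ((i : Nat) : Int) by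
      simp only [PySem.Chars.len_eq]; omega]
    rw [PySem.List.slice_to_natCast]
  | none =>
    simp only [Option.map_none, Option.elim]
    rw [if_neg (by norm_num : ¬ (0 : Int) < 0)]
    have hiff2 : (PySem.Chars.isIn l2 l1 = true) ↔ (PySem.Chars.find l1 l2 ≠ -1) := by
      rw [PySem.Chars.isIn_iff_infix, PySem.Chars.find_ne_neg_one_iff]
    by_cases hin2 : PySem.Chars.find l1 l2 ≠ -1
    · rw [if_pos (hiff2.mpr hin2), if_pos hin2]
    · rw [if_neg (fun h => hin2 (hiff2.mp h)), if_neg hin2]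
      have hiff3 : (PySem.Chars.isIn l1 l2 = true) ↔ (PySem.Chars.find l2 l1 ≠ -1) := by
        rw [PySem.Chars.isIn_iff_infix, PySem.Chars.find_ne_neg_one_iff]
      by_cases hin3 : PySem.Chars.find l2 l1 ≠ -1
      · rw [if_pos (hiff3.mpr hin3), if_pos hin3]
      · rw [if_neg (fun h => hin3 (hiff3.mp h)), if_neg hin3]
        cases hfo4 : (List.range' (l2.length - min l1.length l2.length) (min l1.length l2.length)).find?
            (fun i => decide (l2.drop i <+: l1)) with
        | some i =>
          have hi := List.mem_range'_1.mp (List.mem_of_find?_eq_some hfo4)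
          have hilt : i < l2.length := by omega
          simp only [Option.map_some]
          rw [if_pos (by omega : (0 : Int) < (l2.length : Int) - i)]
          rw [show (l2.length : Int) - (i : Int) = ((l2.length - i : Nat) : Int) by omega]
          rw [PySem.List.slice_to_natCast]
        | none =>
          simp only [Option.map_none]
          rw [if_neg (by norm_num : ¬ (0 : Int) < 0)]

-- ===== VERDICT (by name: the statement is the Claim_ definition above) =====
theorem handle_overlap_cases_spec : Claim_equal_handle_overlap_cases := by
  intro str1 str2 _
  unfold Spec_handle_overlap_cases handle_overlap_cases handle_overlap_cases_alt
  rw [hoc_eq]
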